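-- pv_equiv track=rewrite | github.com/acksmaggart/columnar | columnar/main.py | convert_data_to_logical_rows
-- ===== SOURCE A (Python) =====
-- from itertools import zip_longest
--
-- def convert_data_to_logical_rows(full_data):
--     """
--     Takes a list of lists of items. Returns a list of logical rows, where each logical
--     row is a list of lists, where each sub-list in a logical row is a physical row to be
--     printed to the screen. There will only be more than one phyical row in a logical
--     row if one of the columns wraps past one line.
--     """
--     logical_rows = []
--     for row in full_data:
--         cells_varying_lengths = []
--         for cell in row:
--             lines = str(cell).split('\n')
--             cells_varying_lengths.append(lines)
--         cells = [[cell_text or '' for cell_text in physical_row] for physical_row in zip_longest(*cells_varying_lengths)]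
--         logical_rows.append(cells)
--     return logical_rows
-- ===== SOURCE B (Python) =====
-- def _merge_cell(phys, width, lines):
--     # Fold one cell's line-list into the accumulated physical rows, column-wise:
--     # extend paired rows, then pad whichever side sticks out.
--     out = [pr + [line] for pr, line in zip(phys, lines)]
--     n = len(out)
--     out += [pr + [''] for pr in phys[n:]]
--     out += [[''] * width + [line] for line in lines[n:]]
--     return out
--
--
-- def convert_data_to_logical_rows(full_data):
--     logical_rows = []
--     for row in full_data:
--         phys = []
--         width = 0
--         for cell in row:
--             phys = _merge_cell(phys, width, str(cell).split('\n'))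
--             width += 1
--         logical_rows.append(phys)
--     return logical_rows
-- ===== Notes on version B (the rewrite author's own statement) =====
-- stated objective: alternative
-- what changed: Instead of collecting all cells' line-lists and transposing them at once with zip_longest, B folds the row cell by cell, merging each cell's lines into the accumulated physical rows column-wise (extending paired rows, padding whichever side sticks out with empty strings).
import Mathlib
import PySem

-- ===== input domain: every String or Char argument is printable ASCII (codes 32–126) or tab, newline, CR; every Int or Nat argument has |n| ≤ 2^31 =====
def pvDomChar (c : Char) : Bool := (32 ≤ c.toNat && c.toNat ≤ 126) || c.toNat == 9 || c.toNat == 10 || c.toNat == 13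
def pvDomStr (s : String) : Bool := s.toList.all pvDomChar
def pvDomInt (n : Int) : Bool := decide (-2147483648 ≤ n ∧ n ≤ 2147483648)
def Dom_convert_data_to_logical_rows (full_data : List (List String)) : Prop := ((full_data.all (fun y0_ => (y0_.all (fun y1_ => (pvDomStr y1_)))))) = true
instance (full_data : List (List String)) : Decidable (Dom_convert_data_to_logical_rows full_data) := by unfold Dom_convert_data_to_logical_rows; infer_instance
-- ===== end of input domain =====

-- B builds each logical row incrementally, folding one cell at a time into the accumulated
-- physical rows (column-wise merge with padding), instead of A's collect-then-transpose
-- via zip_longest; return values proved identical.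

-- ===== PORT A =====
-- loop measure for the zip_longest transliteration (fuel: the number of tuples it yields)
def pvMaxLen (lss : List (List String)) : Nat := lss.foldl (fun a l => max a l.length) 0

-- zip_longest(*lss) with fill value None; the fuel pvMaxLen lss only bounds the loop
-- (fuel 0 is reached exactly when every column is exhausted, where the loop stops anyway)
def pvZipLongestAux : Nat → List (List String) → List (List (Option String))
  | 0, _ => []
  | fuel + 1, lss =>
      if lss.all (·.isEmpty) then []
      else (lss.map List.head?) :: pvZipLongestAux fuel (lss.map (List.drop 1))

def pvZipLongest (lss : List (List String)) : List (List (Option String)) :=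
  pvZipLongestAux (pvMaxLen lss) lss

-- `cell_text or ''` on an entry of a zip_longest tuple (None for an exhausted column)
def pvOrEmpty (o : Option String) : String :=
  match o with
  | none => ""
  | some s => if s = "" then "" else s

def convert_data_to_logical_rows (full_data : List (List String)) : List (List (List String)) :=
  full_data.map (fun row =>
    let cells_varying_lengths := row.map (fun cell => (PySem.Str.split? cell "\n").getD [])
    (pvZipLongest cells_varying_lengths).map (fun physical_row => physical_row.map pvOrEmpty))

-- ===== PORT B =====
-- fold one cell's line-list into the accumulated physical rows, column-wise:
-- extend paired rows, then pad whichever side sticks out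
def pvMergeCell (phys : List (List String)) (width : Nat) (lines : List String) : List (List String) :=
  ((phys.zip lines).map (fun pl => pl.1 ++ [pl.2]))
    ++ (phys.drop ((phys.zip lines).map (fun pl => pl.1 ++ [pl.2])).length).map (fun pr => pr ++ [""])
    ++ (lines.drop ((phys.zip lines).map (fun pl => pl.1 ++ [pl.2])).length).map (fun l => List.replicate width "" ++ [l])

def convert_data_to_logical_rows_alt (full_data : List (List String)) : List (List (List String)) :=
  full_data.map (fun row =>
    (row.foldl (fun (st : List (List String) × Nat) cell =>
        (pvMergeCell st.1 st.2 ((PySem.Str.split? cell "\n").getD []), st.2 + 1))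
      (([] : List (List String)), 0)).1)

-- ===== PRECONDITION & SPEC =====
def Spec_convert_data_to_logical_rows (full_data : List (List String)) (out : List (List (List String))) : Prop := out = convert_data_to_logical_rows_alt full_data
instance (full_data : List (List String)) (out : List (List (List String))) : Decidable (Spec_convert_data_to_logical_rows full_data out) := by unfold Spec_convert_data_to_logical_rows; infer_instance

-- ===== CLAIM (what is proved, stated in full; the proofs are below) =====
def Claim_equal_convert_data_to_logical_rows : Prop := ∀ (full_data : List (List String)), Dom_convert_data_to_logical_rows full_data → Spec_convert_data_to_logical_rows full_data (convert_data_to_logical_rows full_data)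

-- ===== LEMMAS AND PROOFS =====

-- canonical form of one logical row: row i of the padded transpose, by direct indexing
def pvC (lists : List (List String)) : List (List String) :=
  (List.range (pvMaxLen lists)).map (fun i => lists.map (fun l => l.getD i ""))

theorem pvMaxLen_foldl (lss : List (List String)) (b : Nat) :
    lss.foldl (fun a l => max a (l.length - 1)) (b - 1)
      = lss.foldl (fun a l => max a l.length) b - 1 := by
  induction lss generalizing b with
  | nil => rfl
  | cons l t ih =>
      simp only [List.foldl_cons]
      rw [show max (b - 1) (l.length - 1) = max b l.length - 1 by omega, ih]

theorem pvMaxLen_drop (lss : List (List String)) :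
    pvMaxLen (lss.map (List.drop 1)) = pvMaxLen lss - 1 := by
  unfold pvMaxLen
  rw [List.foldl_map]
  simp only [List.length_drop]
  simpa using pvMaxLen_foldl lss 0

theorem pvMaxLen_zero (lss : List (List String)) (h : lss.all (·.isEmpty)) :
    pvMaxLen lss = 0 := by
  simp only [List.all_eq_true] at h
  unfold pvMaxLen
  induction lss with
  | nil => rfl
  | cons l t ih =>
      have hl : l = [] := by
        have := h l (by simp)
        simpa [List.isEmpty_iff] using this
      subst hl
      simp only [List.foldl_cons, List.length_nil, Nat.max_zero]
      exact ih (fun x hx => h x (by simp [hx]))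

theorem pvZipLongestAux_eq (H : Nat) (lss : List (List String)) (hH : pvMaxLen lss = H) :
    pvZipLongestAux H lss = (List.range H).map (fun i => lss.map (fun l => l[i]?)) := by
  induction H generalizing lss with
  | zero => rfl
  | succ n ih =>
      rw [pvZipLongestAux]
      have hne : ¬ lss.all (·.isEmpty) := by
        intro hall
        rw [pvMaxLen_zero lss hall] at hH
        omega
      rw [if_neg hne]
      have htail : pvMaxLen (lss.map (List.drop 1)) = n := by
        rw [pvMaxLen_drop, hH]
        omega
      rw [ih _ htail, List.range_succ_eq_map]
      simp only [List.map_cons, List.map_map]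
      congr 1
      · simp [List.head?_eq_getElem?]
      · apply List.map_congr_left
        intro i _
        simp only [Function.comp]
        apply List.map_congr_left
        intro l _
        simp [Nat.succ_eq_add_one]

-- A's fixed-up transpose row equals the canonical row
theorem pvRowA_eq (lists : List (List String)) :
    (pvZipLongest lists).map (fun pr => pr.map pvOrEmpty) = pvC lists := by
  unfold pvZipLongest pvC
  rw [pvZipLongestAux_eq _ _ rfl, List.map_map]
  apply List.map_congr_left
  intro i _
  simp only [Function.comp, List.map_map]
  apply List.map_congr_left
  intro l _
  simp only [Function.comp]
  unfold pvOrEmpty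
  by_cases h : i < l.length
  · have hg : l[i]? = some l[i] := List.getElem?_eq_getElem h
    simp [List.getD, hg]
  · have hg : l[i]? = none := List.getElem?_eq_none (by omega)
    simp [hg, List.getD]

theorem pvMaxLen_append_single (pre : List (List String)) (ls : List String) :
    pvMaxLen (pre ++ [ls]) = max (pvMaxLen pre) ls.length := by
  unfold pvMaxLen
  rw [List.foldl_append]
  rfl

theorem pvFoldlMax_ge_init (t : List (List String)) : ∀ (b : Nat), b ≤ t.foldl (fun a x => max a x.length) b := by
  induction t with
  | nil => intro b; simp
  | cons y ys ih =>
      intro b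
      simp only [List.foldl_cons]
      exact le_trans (le_max_left _ _) (ih _)

theorem pvLen_le_maxLen (lists : List (List String)) (l : List String) (h : l ∈ lists) :
    l.length ≤ pvMaxLen lists := by
  unfold pvMaxLen
  have key : ∀ (t : List (List String)) (b : Nat), l ∈ t → l.length ≤ t.foldl (fun a x => max a x.length) b := by
    intro t
    induction t with
    | nil => intro b hb; cases hb
    | cons x xs ih =>
        intro b hb
        simp only [List.foldl_cons]
        rcases List.mem_cons.mp hb with rfl | hmem
        · exact le_trans (le_max_right _ _) (pvFoldlMax_ge_init xs _)
        · exact ih _ hmem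
  exact key lists 0 h

-- the key step: merging one more cell into the canonical accumulator
theorem pvMergeCell_eq (pre : List (List String)) (ls : List String) :
    pvMergeCell (pvC pre) pre.length ls = pvC (pre ++ [ls]) := by
  unfold pvMergeCell pvC
  rw [pvMaxLen_append_single]
  apply List.ext_getElem
  · simp only [List.length_append, List.length_map, List.length_zip, List.length_range,
      List.length_drop]
    omega
  · intro i hi1 hi2
    simp only [List.length_append, List.length_map, List.length_zip, List.length_range,
      List.length_drop] at hi1 hi2
    simp only [List.getElem_append, List.getElem_map, List.getElem_range, List.getElem_drop,
      List.getElem_zip, List.map_append, List.map_cons, List.map_nil]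
    split_ifs with h1 h2
    · -- i < min n m
      simp only [List.length_append, List.length_map, List.length_zip, List.length_range,
        List.length_drop] at h1 h2
      congr 1
      have him : i < ls.length := by omega
      simp [List.getD_eq_getElem?_getD, List.getElem?_eq_getElem him]
    · -- padding rows of phys: ls.length ≤ i < pvMaxLen pre
      simp only [List.length_append, List.length_map, List.length_zip, List.length_range,
        List.length_drop] at h1 h2 ⊢
      rw [show min (pvMaxLen pre) ls.length + (i - min (pvMaxLen pre) ls.length) = i by omega]
      congr 1
      have him : ls.length ≤ i := by omega
      simp [List.getD_eq_getElem?_getD, List.getElem?_eq_none him]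
    · -- new rows from ls: pvMaxLen pre ≤ i < ls.length
      simp only [List.length_append, List.length_map, List.length_zip, List.length_range,
        List.length_drop] at h1 ⊢
      have hin : pvMaxLen pre ≤ i := by omega
      have him : i < ls.length := by omega
      have hidx : min (pvMaxLen pre) ls.length +
          (i - (min (pvMaxLen pre) ls.length + (pvMaxLen pre - min (pvMaxLen pre) ls.length))) = i := by omega
      congr 1
      · symm
        rw [List.eq_replicate_iff]
        refine ⟨by simp, ?_⟩
        intro b hb
        rcases List.mem_map.mp hb with ⟨l, hl, rfl⟩
        have := pvLen_le_maxLen pre l hl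
        simp [List.getD_eq_getElem?_getD, List.getElem?_eq_none (by omega : l.length ≤ i)]
      · rw [getElem_congr_idx hidx]
        congr 1
        simp [List.getD_eq_getElem?_getD, List.getElem?_eq_getElem him]

theorem pvFold_inv (rest pre : List (List String)) :
    rest.foldl (fun (st : List (List String) × Nat) ls => (pvMergeCell st.1 st.2 ls, st.2 + 1))
        (pvC pre, pre.length)
      = (pvC (pre ++ rest), pre.length + rest.length) := by
  induction rest generalizing pre with
  | nil => simp
  | cons ls t ih =>
      simp only [List.foldl_cons, pvMergeCell_eq]
      have e : (pre ++ [ls]).length = pre.length + 1 := by simp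
      have h := ih (pre ++ [ls])
      rw [e] at h
      rw [h]
      simp only [Prod.mk.injEq]
      refine ⟨by rw [List.append_assoc, List.singleton_append], by simp; omega⟩

-- ===== VERDICT (by name: the statement is the Claim_ definition above) =====
theorem convert_data_to_logical_rows_spec : Claim_equal_convert_data_to_logical_rows := by
  intro full_data _
  unfold Spec_convert_data_to_logical_rows convert_data_to_logical_rows convert_data_to_logical_rows_alt
  apply List.map_congr_left
  intro row _
  rw [pvRowA_eq]
  have hmap : row.foldl (fun (st : List (List String) × Nat) cell =>
      (pvMergeCell st.1 st.2 ((PySem.Str.split? cell "\n").getD []), st.2 + 1))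
        (([] : List (List String)), 0)
      = (row.map (fun cell => (PySem.Str.split? cell "\n").getD [])).foldl
          (fun (st : List (List String) × Nat) ls => (pvMergeCell st.1 st.2 ls, st.2 + 1))
          (([] : List (List String)), 0) := by
    rw [List.foldl_map]
  rw [hmap]
  have h0 : (([] : List (List String)), (0:Nat)) = (pvC [], ([] : List (List String)).length) := by
    simp [pvC, pvMaxLen]
  rw [h0, pvFold_inv]
  simp
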